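-- pv_equiv track=rewrite | github.com/Patrycja-Bien/pp1 | 04-Subroutines/ex30.py | f
-- ===== SOURCE A (Python) =====
-- def f(number, even):
--     if even == True:
--         sum = 0
--         while number > 0:
--             if number %2 == 0:
--                 sum += number % 10
--                 number //= 10
--             else:
--                 number //= 10
--         return sum
--     else:
--         sum = 0
--         while number > 0:
--             if number %2 != 0:
--                 sum += number % 10
--                 number //= 10
--             else:
--                 number //= 10
--         return sum
-- ===== SOURCE B (Python) =====
-- def f(number, even):
--     if number <= 0:
--         return 0
--     target = 0 if even == True else 1
--     return sum(int(c) for c in str(number) if int(c) % 2 == target)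
-- ===== Notes on version B (the rewrite author's own statement) =====
-- stated objective: idiomatic
-- what changed: Replaces A's two near-identical mod/floor-division while-loops with a single guarded comprehension over the decimal string of the number, summing the characters of the chosen parity.
import Mathlib
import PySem

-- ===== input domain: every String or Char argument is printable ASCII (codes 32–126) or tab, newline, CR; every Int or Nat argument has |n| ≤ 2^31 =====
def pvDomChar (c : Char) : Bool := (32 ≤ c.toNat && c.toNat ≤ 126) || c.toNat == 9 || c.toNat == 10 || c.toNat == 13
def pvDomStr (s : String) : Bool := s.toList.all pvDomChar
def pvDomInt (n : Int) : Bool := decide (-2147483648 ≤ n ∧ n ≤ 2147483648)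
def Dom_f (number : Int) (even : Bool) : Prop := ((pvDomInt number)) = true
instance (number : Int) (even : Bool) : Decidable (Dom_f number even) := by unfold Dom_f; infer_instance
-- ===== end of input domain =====

-- B replaces A's two near-identical mod/floordiv while-loops with a single guarded
-- sum over the decimal-string characters of the chosen parity (idiomatic; same cost).


-- ===== PORT A =====
-- the 'even == True' branch: while number > 0, add number % 10 when number % 2 == 0
def fEvenLoop (number sum : Int) : Int :=
  if 0 < number then
    if PySem.Int.mod number 2 = 0 then
      fEvenLoop (PySem.Int.floordiv number 10) (sum + PySem.Int.mod number 10)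
    else
      fEvenLoop (PySem.Int.floordiv number 10) sum
  else sum
termination_by number.toNat
decreasing_by
  all_goals
    simp only [PySem.Int.floordiv, Int.fdiv_eq_ediv]
    omega

-- the 'else' branch: while number > 0, add number % 10 when number % 2 != 0
def fOddLoop (number sum : Int) : Int :=
  if 0 < number then
    if PySem.Int.mod number 2 ≠ 0 then
      fOddLoop (PySem.Int.floordiv number 10) (sum + PySem.Int.mod number 10)
    else
      fOddLoop (PySem.Int.floordiv number 10) sum
  else sum
termination_by number.toNat
decreasing_by
  all_goals
    simp only [PySem.Int.floordiv, Int.fdiv_eq_ediv]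
    omega

def f (number : Int) (even : Bool) : Int :=
  if even == true then fEvenLoop number 0 else fOddLoop number 0

-- ===== PORT B =====
-- int(c) for a single decimal-digit character of str(number) is its code minus 48 (exact on those chars)
def chInt (c : Char) : Int := (c.toNat : Int) - 48

def f_alt (number : Int) (even : Bool) : Int :=
  if number ≤ 0 then 0
  else
    let target : Int := if even == true then 0 else 1
    (((PySem.Int.toStr number).toList.filter
        (fun c => PySem.Int.mod (chInt c) 2 == target)).map chInt).foldl (· + ·) 0

-- ===== PRECONDITION & SPEC =====
def Spec_f (number : Int) (even : Bool) (out : Int) : Prop := out = f_alt number even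
instance (number : Int) (even : Bool) (out : Int) : Decidable (Spec_f number even out) := by unfold Spec_f; infer_instance

-- ===== CLAIM (what is proved, stated in full; the proofs are below) =====
def Claim_equal_f : Prop := ∀ (number : Int) (even : Bool), Dom_f number even → Spec_f number even (f number even)

-- ===== LEMMAS AND PROOFS =====

-- reference value: sum of the base-10 digits of n whose parity is t
def dsum (t : Nat) (n : Nat) : Int :=
  if n = 0 then 0
  else (if n % 2 = t then ((n % 10 : Nat) : Int) else 0) + dsum t (n / 10)
termination_by n
decreasing_by omega

lemma dsum_pos (t n : Nat) (h : n ≠ 0) :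
    dsum t n = (if n % 2 = t then ((n % 10 : Nat) : Int) else 0) + dsum t (n / 10) := by
  rw [dsum]; simp [h]

lemma toNat_fdiv10 (n : Int) : (PySem.Int.floordiv n 10).toNat = n.toNat / 10 := by
  simp only [PySem.Int.floordiv, Int.fdiv_eq_ediv]
  omega

lemma mod2_eq (n : Int) (h : 0 < n) : PySem.Int.mod n 2 = ((n.toNat % 2 : Nat) : Int) := by
  simp only [PySem.Int.mod, Int.fmod_eq_emod]
  omega

lemma mod10_eq (n : Int) (h : 0 < n) : PySem.Int.mod n 10 = ((n.toNat % 10 : Nat) : Int) := by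
  simp only [PySem.Int.mod, Int.fmod_eq_emod]
  omega

lemma fEvenLoop_eq (n s : Int) : fEvenLoop n s = s + dsum 0 n.toNat := by
  induction n, s using fEvenLoop.induct with
  | case1 n s h hc ih =>
    rw [fEvenLoop, if_pos h, if_pos hc, ih, toNat_fdiv10, mod10_eq n h,
        dsum_pos 0 n.toNat (by omega), if_pos (by rw [mod2_eq n h] at hc; omega)]
    ring
  | case2 n s h hc ih =>
    rw [fEvenLoop, if_pos h, if_neg hc, ih, toNat_fdiv10,
        dsum_pos 0 n.toNat (by omega), if_neg (by rw [mod2_eq n h] at hc; omega)]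
    ring
  | case3 n s h =>
    rw [fEvenLoop, if_neg h]
    have h0 : n.toNat = 0 := by omega
    rw [h0, dsum]; simp

lemma fOddLoop_eq (n s : Int) : fOddLoop n s = s + dsum 1 n.toNat := by
  induction n, s using fOddLoop.induct with
  | case1 n s h hc ih =>
    rw [fOddLoop, if_pos h, if_pos hc, ih, toNat_fdiv10, mod10_eq n h,
        dsum_pos 1 n.toNat (by omega), if_pos (by rw [mod2_eq n h] at hc; omega)]
    ring
  | case2 n s h hc ih =>
    rw [fOddLoop, if_pos h, if_neg hc, ih, toNat_fdiv10,
        dsum_pos 1 n.toNat (by omega), if_neg (by rw [mod2_eq n h] at hc; omega)]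
    ring
  | case3 n s h =>
    rw [fOddLoop, if_neg h]
    have h0 : n.toNat = 0 := by omega
    rw [h0, dsum]; simp

lemma chInt_digitChar (d : Nat) (h : d < 10) : chInt (Nat.digitChar d) = (d : Int) := by
  interval_cases d <;> decide

-- the B-side sum, as a function of the character list
def csum (t : Int) (l : List Char) : Int :=
  ((l.filter (fun c => PySem.Int.mod (chInt c) 2 == t)).map chInt).foldl (· + ·) 0

lemma foldl_add_shift (l : List Int) (a : Int) :
    l.foldl (· + ·) a = a + l.foldl (· + ·) 0 := by
  induction l generalizing a with
  | nil => simp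
  | cons x xs ih => simp only [List.foldl_cons]; rw [ih (a + x), ih (0 + x)]; ring

lemma csum_cons (t : Int) (c : Char) (l : List Char) :
    csum t (c :: l) = (if PySem.Int.mod (chInt c) 2 == t then chInt c else 0) + csum t l := by
  simp only [csum, List.filter_cons]
  split_ifs with h
  · simp only [List.map_cons, List.foldl_cons, zero_add]
    rw [foldl_add_shift]
  · simp

lemma natMod2 (d : Nat) : PySem.Int.mod (d : Int) 2 = ((d % 2 : Nat) : Int) := by
  simp only [PySem.Int.mod, Int.fmod_eq_emod]
  omega

lemma core_sum (t : Nat) (ht : t ≤ 1) :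
    ∀ fuel n acc, n < fuel →
      csum (t : Int) (Nat.toDigitsCore 10 fuel n acc) = dsum t n + csum (t : Int) acc := by
  intro fuel
  induction fuel with
  | zero => omega
  | succ f ih =>
    intro n acc hn
    simp only [Nat.toDigitsCore]
    have hd : chInt ((n % 10).digitChar) = ((n % 10 : Nat) : Int) :=
      chInt_digitChar _ (by omega)
    have hm : ((n % 10) % 2 : Nat) = n % 2 := by omega
    by_cases h10 : n / 10 = 0
    · rw [if_pos h10, csum_cons, hd, natMod2, hm]
      by_cases hn0 : n = 0
      · subst hn0; simp [dsum]
      · rw [dsum_pos t n hn0, h10, dsum]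
        simp only [beq_iff_eq, Nat.cast_inj]
        by_cases hp : n % 2 = t <;> simp [hp]
    · rw [if_neg h10, ih (n / 10) _ (by omega), csum_cons, hd, natMod2, hm,
          dsum_pos t n (by omega)]
      simp only [beq_iff_eq, Nat.cast_inj]
      by_cases hp : n % 2 = t <;> simp [hp] <;> ring

lemma f_alt_eq_csum (number : Int) (even : Bool) :
    f_alt number even =
      if number ≤ 0 then 0
      else csum (if even == true then 0 else 1) ((PySem.Int.toStr number).toList) := rfl

lemma toStr_toList_pos (n : Int) (h : 0 < n) :
    (PySem.Int.toStr n).toList = Nat.toDigitsCore 10 (n.toNat + 1) n.toNat [] := by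
  rw [PySem.Int.toList_toStr]
  simp [PySem.Int.toChars, not_lt.2 (le_of_lt h), Nat.toDigits]

lemma f_eq_alt (number : Int) (even : Bool) : f number even = f_alt number even := by
  rw [f, f_alt_eq_csum]
  by_cases hn : number ≤ 0
  · rw [if_pos hn]
    have h0 : number.toNat = 0 := by omega
    cases even <;>
      simp [fEvenLoop_eq, fOddLoop_eq, h0, dsum]
  · rw [if_neg hn, toStr_toList_pos number (by omega)]
    cases even with
    | false =>
      have h := core_sum 1 (by omega) (number.toNat + 1) number.toNat [] (by omega)
      rw [Nat.cast_one, show csum 1 ([] : List Char) = 0 from rfl, add_zero] at h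
      norm_num [fOddLoop_eq, h]
    | true =>
      have h := core_sum 0 (by omega) (number.toNat + 1) number.toNat [] (by omega)
      rw [Nat.cast_zero, show csum 0 ([] : List Char) = 0 from rfl, add_zero] at h
      norm_num [fEvenLoop_eq, h]

-- ===== VERDICT (by name: the statement is the Claim_ definition above) =====
theorem f_spec : Claim_equal_f := by
  intro number even _
  unfold Spec_f
  exact f_eq_alt number even
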